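-- pv_equiv track=rewrite | github.com/Thomaz-Castro/Conversor_Online | defs_copy.py | Conditions_visualg
-- ===== SOURCE A (Python) =====
-- def Conditions_visualg(string):
--     if (("(" in string) and (")" in string)):
--         pilha = []
--         conteudo = []
--         for i, char in enumerate(string):
--             if char == '(':
--                 pilha.append(i)
--             elif char == ')':
--                 if pilha:
--                     inicio = pilha.pop()
--                     if not pilha:
--                         conteudo.append(string[inicio+1:i])
--                 else:
--                     raise ValueError("Erro de correspondência de parênteses.")
--
--         conteudo_parenteses = ", ".join(conteudo)
--         conteudo_parenteses = "(" + conteudo_parenteses + ")"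
--         conteudo_parenteses = conteudo_parenteses.lower()
--         conteudo_parenteses = conteudo_parenteses.replace(" e ", " && ")
--         conteudo_parenteses = conteudo_parenteses.replace(" ou ", " || ")
--         conteudo_parenteses = conteudo_parenteses.replace(" mod ", " % ")
--         conteudo_parenteses = conteudo_parenteses.replace(" = ", " == ")
--         conteudo_parenteses = conteudo_parenteses.replace(" <> ", " != ")
--
--
--
--     else:
--         conteudo_parenteses = "ERRO - parênteses não encontrados"
--
--     return conteudo_parenteses
-- ===== SOURCE B (Python) =====
-- def _segments(s):
--     # recursive descent: locate the first '(', find its matching ')', recurse on the rest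
--     i = s.find('(')
--     head = s if i == -1 else s[:i]
--     if ')' in head:
--         raise ValueError("Erro de correspondência de parênteses.")
--     if i == -1:
--         return []
--     depth = 1
--     for j in range(i + 1, len(s)):
--         if s[j] == '(':
--             depth += 1
--         elif s[j] == ')':
--             depth -= 1
--             if depth == 0:
--                 return [s[i + 1:j]] + _segments(s[j + 1:])
--     return []  # unmatched '(' : the group is silently dropped
--
--
-- def Conditions_visualg(string):
--     if "(" not in string or ")" not in string:
--         return "ERRO - parênteses não encontrados"
--     out = ("(" + ", ".join(_segments(string)) + ")").lower()
--     for old, new in ((" e ", " && "), (" ou ", " || "), (" mod ", " % "),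
--                      (" = ", " == "), (" <> ", " != ")):
--         out = out.replace(old, new)
--     return out
-- ===== Notes on version B (the rewrite author's own statement) =====
-- stated objective: alternative
-- what changed: B replaces A's single stateful scan (enumerate loop maintaining a stack of open-paren indices) by a recursive descent: find the first '(', locate its matching ')' by a bounded forward search, emit that slice, and recurse on the remainder of the string; the no-parentheses guard becomes an early return and the replace chain a loop over a table of pairs.
import Mathlib
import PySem

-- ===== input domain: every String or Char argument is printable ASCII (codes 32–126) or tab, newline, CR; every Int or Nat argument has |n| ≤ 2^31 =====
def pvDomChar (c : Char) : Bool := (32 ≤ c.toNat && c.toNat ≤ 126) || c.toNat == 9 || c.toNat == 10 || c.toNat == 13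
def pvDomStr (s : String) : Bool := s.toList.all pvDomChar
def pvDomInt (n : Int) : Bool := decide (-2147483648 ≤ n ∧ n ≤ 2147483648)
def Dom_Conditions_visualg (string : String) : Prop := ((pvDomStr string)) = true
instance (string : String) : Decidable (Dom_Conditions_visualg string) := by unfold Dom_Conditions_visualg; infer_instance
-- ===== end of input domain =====

-- B re-implements A by recursive descent (find first '(', match it, recurse on the rest)
-- instead of A's single stateful stack scan (objective: alternative, same cost); both A and B
-- raise ValueError on an unmatched ')' when both paren kinds occur — those inputs are outside Pre_.


-- ===== PORT A =====
-- loop body of A; state = none once the Python has raised ValueError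
def pvStepA (s : List Char) (st : Option (List Int × List (List Char))) (p : Int × Char) :
    Option (List Int × List (List Char)) :=
  match st with
  | none => none
  | some (pilha, cont) =>
    if p.2 = '(' then some (pilha ++ [p.1], cont)
    else if p.2 = ')' then
      match pilha.getLast? with
      | some inicio =>
        let pilha' := pilha.dropLast
        if pilha' = [] then some (pilha', cont ++ [PySem.List.slice s (some (inicio + 1)) (some p.1)])
        else some (pilha', cont)
      | none => none            -- Python: raise ValueError (excluded by Pre_)
    else some (pilha, cont)

def Conditions_visualg (string : String) : String :=
  if PySem.Str.isIn "(" string && PySem.Str.isIn ")" string then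
    match (PySem.List.enumerate string.toList).foldl (pvStepA string.toList) (some ([], [])) with
    | none => ""                -- Python raises here; excluded by Pre_
    | some (_, conteudo) =>
      let cp := PySem.Chars.join (", ".toList) conteudo
      let cp := '(' :: cp ++ [')']
      let cp := PySem.Chars.lower cp
      let cp := PySem.Chars.replace cp " e ".toList " && ".toList
      let cp := PySem.Chars.replace cp " ou ".toList " || ".toList
      let cp := PySem.Chars.replace cp " mod ".toList " % ".toList
      let cp := PySem.Chars.replace cp " = ".toList " == ".toList
      let cp := PySem.Chars.replace cp " <> ".toList " != ".toList
      String.ofList cp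
  else "ERRO - parênteses não encontrados"

-- ===== PORT B =====
-- B's inner for-loop 'for j in range(i+1, len(s))' hunting the matching ')' of the first '(';
-- returns the offset of that ')' within s[i+1:], none if the loop falls off the end
def pvFindClose (depth : Int) : List Char → Option Nat
  | [] => none
  | c :: t =>
    if c = '(' then (pvFindClose (depth + 1) t).map (· + 1)
    else if c = ')' then
      if depth - 1 = 0 then some 0 else (pvFindClose (depth - 1) t).map (· + 1)
    else (pvFindClose depth t).map (· + 1)

-- B's _segments: 's.find('(')' + 's[:i]' is the takeWhile/dropWhile split at the first '('
-- (exact for a single-character needle); 's[i+1:j]' = t.take m, 's[j+1:]' = t.drop (m+1);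
-- none = the Python raise ValueError (excluded by Pre_)
def pvSegments (s : List Char) : Option (List (List Char)) :=
  if ')' ∈ s.takeWhile (· ≠ '(') then none
  else
    match h : s.dropWhile (· ≠ '(') with
    | [] => some []
    | _ :: t =>
      match pvFindClose 1 t with
      | none => some []         -- unmatched '(' : the group is silently dropped
      | some m => (pvSegments (t.drop (m + 1))).map (fun segs => t.take m :: segs)
termination_by s.length
decreasing_by
  have hle := List.length_dropWhile_le (fun c => decide (c ≠ '(')) s
  rw [h] at hle
  simp at hle ⊢
  omega

def pvReplTable : List (List Char × List Char) :=
  [(" e ".toList, " && ".toList), (" ou ".toList, " || ".toList), (" mod ".toList, " % ".toList),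
   (" = ".toList, " == ".toList), (" <> ".toList, " != ".toList)]

def Conditions_visualg_alt (string : String) : String :=
  if !(PySem.Str.isIn "(" string) || !(PySem.Str.isIn ")" string) then
    "ERRO - parênteses não encontrados"
  else
    match pvSegments string.toList with
    | none => ""                -- Python raises here; excluded by Pre_
    | some segs =>
      let out := PySem.Chars.lower ('(' :: PySem.Chars.join (", ".toList) segs ++ [')'])
      String.ofList (pvReplTable.foldl (fun acc p => PySem.Chars.replace acc p.1 p.2) out)

-- ===== PRECONDITION & SPEC =====
-- Pre_ excludes exactly the inputs on which Python A (and Python B) raises ValueError: strings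
-- containing both paren kinds in which some ')' is not preceded by strictly more '(' than ')'.
def Pre_Conditions_visualg (string : String) : Prop :=
  (PySem.Str.isIn "(" string = true ∧ PySem.Str.isIn ")" string = true) →
  ∀ i, i < string.toList.length → string.toList[i]! = ')' →
    (string.toList.take i).count ')' < (string.toList.take i).count '('
instance (string : String) : Decidable (Pre_Conditions_visualg string) := by
  unfold Pre_Conditions_visualg; infer_instance
def pvWitness_Conditions_visualg : String := "(a E b) ou (c)"
def Spec_Conditions_visualg (string : String) (out : String) : Prop := out = Conditions_visualg_alt string
instance (string : String) (out : String) : Decidable (Spec_Conditions_visualg string out) := by unfold Spec_Conditions_visualg; infer_instance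

-- ===== CLAIM (what is proved, stated in full; the proofs are below) =====
def Claim_equal_Conditions_visualg : Prop := ∀ (string : String), Dom_Conditions_visualg string → Pre_Conditions_visualg string → Spec_Conditions_visualg string (Conditions_visualg string)

-- ===== LEMMAS AND PROOFS =====
theorem foldA_none (s : List Char) (l : List (Int × Char)) :
    l.foldl (pvStepA s) none = none := by
  induction l with
  | nil => rfl
  | cons p t ih => simpa [pvStepA] using ih

-- head phase: characters before the first '(' leave the empty-stack state alone, or raise on ')'
theorem foldA_head (w : List Char) (cs : List Char) :
    ∀ (j : Int) (cont : List (List Char)), (∀ c ∈ cs, c ≠ '(') →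
    (PySem.List.enumerate cs j).foldl (pvStepA w) (some ([], cont))
      = if ')' ∈ cs then none else some ([], cont) := by
  induction cs with
  | nil => intro j cont _; simp [PySem.List.enumerate_nil]
  | cons c t ih =>
    intro j cont h
    have hco : c ≠ '(' := h c (by simp)
    rw [PySem.List.enumerate_cons, List.foldl_cons]
    by_cases hc : c = ')'
    · have : pvStepA w (some ([], cont)) (j, c) = none := by simp [pvStepA, hc]
      rw [this, foldA_none]
      simp [hc]
    · have : pvStepA w (some ([], cont)) (j, c) = some ([], cont) := by
        simp [pvStepA, hco, hc]
      rw [this, ih (j + 1) cont (fun x hx => h x (by simp [hx]))]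
      simp [hc, Ne.symm hc]

-- matcher phase, no matching ')': the stack never empties, cont is untouched
theorem pvFindClose_cons (depth : Int) (c : Char) (t : List Char) :
    pvFindClose depth (c :: t) =
      if c = '(' then (pvFindClose (depth + 1) t).map (· + 1)
      else if c = ')' then
        if depth - 1 = 0 then some 0 else (pvFindClose (depth - 1) t).map (· + 1)
      else (pvFindClose depth t).map (· + 1) := rfl

theorem foldA_noclose (w : List Char) (t : List Char) :
    ∀ (d : Nat) (st : List Int) (j : Int) (cont : List (List Char)),
    pvFindClose ((d : Int) + 1) t = none → st.length = d + 1 →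
    ((PySem.List.enumerate t j).foldl (pvStepA w) (some (st, cont))).map (fun x => x.2)
      = some cont := by
  induction t with
  | nil => intro d st j cont _ _; simp [PySem.List.enumerate_nil]
  | cons c t ih =>
    intro d st j cont hfc hlen
    rw [PySem.List.enumerate_cons, List.foldl_cons, pvFindClose_cons] at *
    by_cases hop : c = '('
    · rw [if_pos hop, Option.map_eq_none_iff] at hfc
      have hstep : pvStepA w (some (st, cont)) (j, c) = some (st ++ [j], cont) := by
        simp [pvStepA, hop]
      rw [hstep]
      have hfc2 : pvFindClose (((d + 1 : Nat) : Int) + 1) t = none := by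
        rw [show (((d + 1 : Nat)) : Int) + 1 = (d : Int) + 1 + 1 by push_cast; ring]
        exact hfc
      exact ih (d + 1) (st ++ [j]) (j + 1) cont hfc2 (by simp [hlen])
    · by_cases hcl : c = ')'
      · rw [if_neg hop, if_pos hcl] at hfc
        have hd0 : d ≠ 0 := by
          intro h; subst h; simp at hfc
        obtain ⟨d', rfl⟩ := Nat.exists_eq_succ_of_ne_zero hd0
        have hnz : ((d'.succ : Nat) : Int) + 1 - 1 ≠ 0 := by push_cast; omega
        rw [if_neg hnz, Option.map_eq_none_iff] at hfc
        have hfc2 : pvFindClose ((d' : Int) + 1) t = none := by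
          rw [show ((d' : Int) + 1) = ((d'.succ : Nat) : Int) + 1 - 1 by push_cast; ring]
          exact hfc
        have hne : st ≠ [] := by intro h; simp [h] at hlen
        obtain ⟨a, sta, rfl⟩ := List.exists_cons_of_ne_nil hne
        have hsl : sta.length = d' + 1 := by simpa using hlen
        have hb : (a :: sta).getLast? = some ((a :: sta).getLast (by simp)) :=
          List.getLast?_eq_some_getLast (by simp)
        have hdne : (a :: sta).dropLast ≠ [] := by
          cases sta with
          | nil => simp at hsl
          | cons y ys => simp
        have hstep : pvStepA w (some (a :: sta, cont)) (j, c) = some ((a :: sta).dropLast, cont) := by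
          simp [pvStepA, hcl, hop, hb, hdne]
        rw [hstep]
        exact ih d' _ (j + 1) cont hfc2 (by simp [List.length_dropLast, hsl])
      · rw [if_neg hop, if_neg hcl, Option.map_eq_none_iff] at hfc
        have hstep : pvStepA w (some (st, cont)) (j, c) = some (st, cont) := by
          simp [pvStepA, hop, hcl]
        rw [hstep]
        exact ih d st (j + 1) cont hfc hlen

-- matcher phase, matching ')' found at offset m: the fold reaches the popped-to-empty state
theorem foldA_close (w : List Char) (t : List Char) :
    ∀ (m : Nat) (d : Nat) (st : List Int) (j i0 : Int) (cont : List (List Char)),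
    pvFindClose ((d : Int) + 1) t = some m → st.length = d + 1 → st.head? = some i0 →
    (PySem.List.enumerate t j).foldl (pvStepA w) (some (st, cont))
      = (PySem.List.enumerate (t.drop (m + 1)) (j + (m : Int) + 1)).foldl (pvStepA w)
          (some ([], cont ++ [PySem.List.slice w (some (i0 + 1)) (some (j + (m : Int)))])) := by
  induction t with
  | nil => intro m d st j i0 cont hfc _ _; simp [pvFindClose] at hfc
  | cons c t ih =>
    intro m d st j i0 cont hfc hlen hhead
    rw [PySem.List.enumerate_cons, List.foldl_cons, pvFindClose_cons] at *
    by_cases hop : c = '('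
    · rw [if_pos hop] at hfc
      obtain ⟨m', hm', rfl⟩ := Option.map_eq_some_iff.mp hfc
      have hfc2 : pvFindClose (((d + 1 : Nat) : Int) + 1) t = some m' := by
        rw [show (((d + 1 : Nat)) : Int) + 1 = (d : Int) + 1 + 1 by push_cast; ring]
        exact hm'
      have hstep : pvStepA w (some (st, cont)) (j, c) = some (st ++ [j], cont) := by
        simp [pvStepA, hop]
      rw [hstep]
      have hne : st ≠ [] := by intro h; simp [h] at hlen
      have hh : (st ++ [j]).head? = some i0 := by
        obtain ⟨a, sta, rfl⟩ := List.exists_cons_of_ne_nil hne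
        simpa using hhead
      rw [ih m' (d + 1) (st ++ [j]) (j + 1) i0 cont hfc2 (by simp [hlen]) hh]
      simp only [List.drop_succ_cons]
      push_cast
      ring_nf
    · by_cases hcl : c = ')'
      · rw [if_neg hop, if_pos hcl] at hfc
        by_cases hd0 : d = 0
        · subst hd0
          have hif : ((0 : Nat) : Int) + 1 - 1 = 0 := by norm_num
          rw [if_pos hif] at hfc
          have hm0 : m = 0 := by simpa using hfc.symm
          subst hm0
          have hst1 : st = [i0] := by
            cases st with
            | nil => simp at hlen
            | cons a sta =>
              cases sta with
              | nil => simp at hhead; rw [hhead]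
              | cons b stb => simp at hlen
          subst hst1
          have hstep : pvStepA w (some ([i0], cont)) (j, c)
              = some ([], cont ++ [PySem.List.slice w (some (i0 + 1)) (some j)]) := by
            simp [pvStepA, hcl, hop]
          rw [hstep]
          simp
        · obtain ⟨d', rfl⟩ := Nat.exists_eq_succ_of_ne_zero hd0
          have hnz : ((d'.succ : Nat) : Int) + 1 - 1 ≠ 0 := by push_cast; omega
          rw [if_neg hnz] at hfc
          obtain ⟨m', hm', rfl⟩ := Option.map_eq_some_iff.mp hfc
          have hfc2 : pvFindClose ((d' : Int) + 1) t = some m' := by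
            rw [show ((d' : Int) + 1) = ((d'.succ : Nat) : Int) + 1 - 1 by push_cast; ring]
            exact hm'
          have hne : st ≠ [] := by intro h; simp [h] at hlen
          obtain ⟨a, sta, rfl⟩ := List.exists_cons_of_ne_nil hne
          have hsl : sta.length = d' + 1 := by simpa using hlen
          have hb : (a :: sta).getLast? = some ((a :: sta).getLast (by simp)) :=
            List.getLast?_eq_some_getLast (by simp)
          have hdne : (a :: sta).dropLast ≠ [] := by
            cases sta with
            | nil => simp at hsl
            | cons y ys => simp
          have hstep : pvStepA w (some (a :: sta, cont)) (j, c) = some ((a :: sta).dropLast, cont) := by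
            simp [pvStepA, hcl, hop, hb, hdne]
          rw [hstep]
          have hh2 : (a :: sta).dropLast.head? = some i0 := by
            cases sta with
            | nil => simp at hsl
            | cons y ys => simpa using hhead
          rw [ih m' d' _ (j + 1) i0 cont hfc2 (by simp [List.length_dropLast, hsl]) hh2]
          simp only [List.drop_succ_cons]
          push_cast
          ring_nf
      · rw [if_neg hop, if_neg hcl] at hfc
        obtain ⟨m', hm', rfl⟩ := Option.map_eq_some_iff.mp hfc
        have hstep : pvStepA w (some (st, cont)) (j, c) = some (st, cont) := by
          simp [pvStepA, hop, hcl]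
        rw [hstep]
        rw [ih m' d st (j + 1) i0 cont hm' hlen hhead]
        simp only [List.drop_succ_cons]
        push_cast
        ring_nf

-- w.drop k = head ++ '(' :: t  ⇒  w.drop (k + head.length + 1) = t
theorem drop_after_open (w head t : List Char) (k : Nat)
    (h : w.drop k = head ++ '(' :: t) : w.drop (k + head.length + 1) = t := by
  have h2 : (w.drop k).drop (head.length + 1) = w.drop (k + head.length + 1) := by
    rw [List.drop_drop]; congr 1 <;> omega
  rw [← h2, h, show head ++ '(' :: t = (head ++ ['(']) ++ t by simp]
  exact List.drop_left' (by simp)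

-- equation lemmas for pvSegments (its definition matches with a named hypothesis)
theorem pvSegments_raise (s : List Char) (h : ')' ∈ s.takeWhile (fun c => decide (c ≠ '('))) :
    pvSegments s = none := by
  rw [pvSegments]
  exact if_pos h

theorem pvSegments_nil (s : List Char) (h1 : ')' ∉ s.takeWhile (fun c => decide (c ≠ '(')))
    (h2 : s.dropWhile (fun c => decide (c ≠ '(')) = []) : pvSegments s = some [] := by
  rw [pvSegments, if_neg h1]
  split
  · rfl
  · next _ _ heq => rw [h2] at heq; cases heq

theorem pvSegments_cons (s : List Char) (c : Char) (t : List Char)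
    (h1 : ')' ∉ s.takeWhile (fun c => decide (c ≠ '(')))
    (h2 : s.dropWhile (fun c => decide (c ≠ '(')) = c :: t) :
    pvSegments s = (match pvFindClose 1 t with
      | none => some []
      | some m => (pvSegments (t.drop (m + 1))).map (fun segs => t.take m :: segs)) := by
  rw [pvSegments, if_neg h1]
  split
  · next heq => rw [h2] at heq; cases heq
  · next _ t' heq =>
    rw [h2] at heq
    injection heq with e1 e2
    subst e2
    rfl

-- the main correspondence: A's stack fold over the suffix w.drop k equals B's recursive descent
theorem foldA_eq_segments (w : List Char) :
    ∀ (n k : Nat) (cont : List (List Char)), (w.drop k).length ≤ n →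
    (((PySem.List.enumerate (w.drop k) (k : Int)).foldl (pvStepA w) (some ([], cont))).map
        (fun x => x.2))
      = (pvSegments (w.drop k)).map (fun segs => cont ++ segs) := by
  intro n
  induction n with
  | zero =>
    intro k cont hlen
    have h0 : w.drop k = [] := List.eq_nil_of_length_eq_zero (Nat.le_zero.mp hlen)
    rw [h0, pvSegments_nil [] (by simp) (by simp)]
    simp [PySem.List.enumerate_nil]
  | succ n ih =>
    intro k cont hlen
    have hsplit : w.drop k
        = (w.drop k).takeWhile (fun c => decide (c ≠ '('))
            ++ (w.drop k).dropWhile (fun c => decide (c ≠ '(')) :=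
      (List.takeWhile_append_dropWhile).symm
    by_cases hcp : ')' ∈ (w.drop k).takeWhile (fun c => decide (c ≠ '('))
    · rw [pvSegments_raise _ hcp]
      conv_lhs => rw [hsplit]
      rw [PySem.List.enumerate_append, List.foldl_append,
        foldA_head w _ (k : Int) cont (fun c hc => by simpa using List.mem_takeWhile_imp hc),
        if_pos hcp, foldA_none]
      rfl
    · have hhead := foldA_head w ((w.drop k).takeWhile (fun c => decide (c ≠ '('))) (k : Int) cont
        (fun c hc => by simpa using List.mem_takeWhile_imp hc)
      rw [if_neg hcp] at hhead
      cases hrest : (w.drop k).dropWhile (fun c => decide (c ≠ '(')) with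
      | nil =>
        rw [pvSegments_nil _ hcp hrest]
        conv_lhs => rw [hsplit]
        rw [hrest, PySem.List.enumerate_append, List.foldl_append, hhead]
        simp [PySem.List.enumerate_nil]
      | cons c t =>
        have hc : c = '(' := by
          have h2 := List.head?_dropWhile_not (fun c => decide (c ≠ '(')) (w.drop k)
          rw [hrest] at h2; simpa using h2
        subst hc
        rw [pvSegments_cons _ _ _ hcp hrest]
        conv_lhs => rw [hsplit]
        rw [hrest, PySem.List.enumerate_append, List.foldl_append, hhead,
          PySem.List.enumerate_cons, List.foldl_cons]
        have hstep : pvStepA w (some ([], cont))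
            ((k : Int) + ((w.drop k).takeWhile (fun c => decide (c ≠ '('))).length, '(')
            = some ([(k : Int) + ((w.drop k).takeWhile (fun c => decide (c ≠ '('))).length], cont) := by
          simp [pvStepA]
        rw [hstep]
        have hdt : w.drop (k + ((w.drop k).takeWhile (fun c => decide (c ≠ '('))).length + 1) = t :=
          drop_after_open w _ t k (by conv_lhs => rw [hsplit, hrest])
        have hsL : (w.drop k).length
            = ((w.drop k).takeWhile (fun c => decide (c ≠ '('))).length + 1 + t.length := by
          conv_lhs => rw [hsplit]
          rw [hrest]
          simp [List.length_append]
          omega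
        cases hfc : pvFindClose 1 t with
        | none =>
          rw [foldA_noclose w t 0 [(k : Int) + ((w.drop k).takeWhile (fun c => decide (c ≠ '('))).length]
            ((k : Int) + ((w.drop k).takeWhile (fun c => decide (c ≠ '('))).length + 1) cont
            (by simpa using hfc) (by simp)]
          simp
        | some m =>
          have hclose := foldA_close w t m 0
            [(k : Int) + ((w.drop k).takeWhile (fun c => decide (c ≠ '('))).length]
            ((k : Int) + ((w.drop k).takeWhile (fun c => decide (c ≠ '('))).length + 1)
            ((k : Int) + ((w.drop k).takeWhile (fun c => decide (c ≠ '('))).length) cont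
            (by simpa using hfc) (by simp) (by simp)
          rw [hclose]
          have hL := ((w.drop k).takeWhile (fun c => decide (c ≠ '('))).length
          have hslice : PySem.List.slice w
              (some ((k : Int) + ((w.drop k).takeWhile (fun c => decide (c ≠ '('))).length + 1))
              (some ((k : Int) + ((w.drop k).takeWhile (fun c => decide (c ≠ '('))).length + 1 + (m : Int)))
              = t.take m := by
            rw [show (k : Int) + ((w.drop k).takeWhile (fun c => decide (c ≠ '('))).length + 1
                = ((k + ((w.drop k).takeWhile (fun c => decide (c ≠ '('))).length + 1 : Nat) : Int)
                by push_cast; ring]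
            rw [PySem.List.slice_natCast_add, hdt]
          have hdt2 : w.drop (k + ((w.drop k).takeWhile (fun c => decide (c ≠ '('))).length + 1 + m + 1)
              = t.drop (m + 1) := by
            have h2 : (w.drop (k + ((w.drop k).takeWhile (fun c => decide (c ≠ '('))).length + 1)).drop (m + 1)
                = w.drop (k + ((w.drop k).takeWhile (fun c => decide (c ≠ '('))).length + 1 + m + 1) := by
              rw [List.drop_drop]; congr 1 <;> omega
            rw [← h2, hdt]
          have hih := ih (k + ((w.drop k).takeWhile (fun c => decide (c ≠ '('))).length + 1 + m + 1)
            (cont ++ [t.take m])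
            (by rw [hdt2]; simp [List.length_drop]; omega)
          rw [hdt2] at hih
          rw [show (k : Int) + ((w.drop k).takeWhile (fun c => decide (c ≠ '('))).length + 1 + (m : Int) + 1
              = ((k + ((w.drop k).takeWhile (fun c => decide (c ≠ '('))).length + 1 + m + 1 : Nat) : Int)
              by push_cast; ring] at hclose ⊢
          rw [hslice, hih]
          cases hps : pvSegments (t.drop (m + 1)) with
          | none => simp [hps]
          | some segs => simp [hps]

-- ===== VERDICT (by name: the statement is the Claim_ definition above) =====
theorem Conditions_visualg_spec : Claim_equal_Conditions_visualg := by
  intro string _ _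
  unfold Spec_Conditions_visualg Conditions_visualg Conditions_visualg_alt
  cases hc1 : PySem.Str.isIn "(" string <;> cases hc2 : PySem.Str.isIn ")" string <;>
    simp only [hc1, hc2, Bool.and_self, Bool.and_true, Bool.and_false, Bool.true_and,
      Bool.false_and, Bool.not_true, Bool.not_false, Bool.or_self, Bool.or_true, Bool.true_or,
      Bool.false_or, if_true, if_false, ite_true, ite_false, Bool.false_eq_true, reduceIte]
  have hmain := foldA_eq_segments string.toList string.toList.length 0 []
    (by simp)
  simp only [List.drop_zero, Nat.cast_zero] at hmain
  cases hA : (PySem.List.enumerate string.toList).foldl (pvStepA string.toList) (some ([], [])) with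
  | none =>
    rw [hA] at hmain
    cases hB : pvSegments string.toList with
    | none => simp
    | some segs => rw [hB] at hmain; simp at hmain
  | some st =>
    rw [hA] at hmain
    cases hB : pvSegments string.toList with
    | none => rw [hB] at hmain; simp at hmain
    | some segs =>
      rw [hB] at hmain
      simp only [Option.map_some, Option.some_inj, List.nil_append] at hmain
      simp [hmain, pvReplTable, List.foldl]
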